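-- pv_equiv track=rewrite | github.com/peterpeeterspeter/workspace | research/bathroom-products/convert-to-csv-v4.py | map_category_from_filename
-- ===== SOURCE A (Python) =====
-- CATEGORY_PRIORITY = {
--     # Highest priority: Granular bathtubs
--     'baden-inbouw': 100,
--     'bathtubs-inbouw': 100,
--     'baden-hoek': 100,
--     'bathtubs-hoek': 100,
--     'baden-vrijstaande': 100,
--     'bathtubs-vrijstaande': 100,
--     'bathtubs-half-vrijstaande': 95,  # Map to vrijstaande
--
--     # Broad categories (lower priority)
--     'baden-alle': 50,
--     'bathtubs-alle': 50,
--     'baden': 50,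
--     'bathtubs': 50,
--     'toiletten-alle': 50,
--     'douche-alle': 50,
--     'wastafels-alle': 50,
--     'kranen-alle': 50,
--     'spiegels-alle': 50,
--     'tegels-alle': 50,
--
--     # Catch-all for other patterns
--     'douche': 40,
--     'wastafels': 40,
--     'kranen': 40,
--     'toiletten': 40,
--     'spiegels': 40,
--     'tegels': 40,
-- }
--
-- def map_category_from_filename(filename: str) -> tuple[str, int]:
--     """Map JSON filename to (category, priority)"""
--     filename_lower = filename.lower()
--
--     # Check all patterns, return highest priority match
--     best_match = ('other', 0)
--
--     for pattern, priority in CATEGORY_PRIORITY.items():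
--         if pattern in filename_lower:
--             if priority > best_match[1]:
--                 best_match = (pattern, priority)
--
--     return best_match
-- ===== SOURCE B (Python) =====
-- # B: patterns grouped into explicit priority tiers, scanned highest tier first
-- # with early exit on the first matching pattern (tier order = descending priority,
-- # in-tier order = A's dict insertion order, so ties break the same way).
-- TIERS = [
--     (100, ['baden-inbouw', 'bathtubs-inbouw', 'baden-hoek', 'bathtubs-hoek',
--            'baden-vrijstaande', 'bathtubs-vrijstaande']),
--     (95, ['bathtubs-half-vrijstaande']),
--     (50, ['baden-alle', 'bathtubs-alle', 'baden', 'bathtubs', 'toiletten-alle',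
--           'douche-alle', 'wastafels-alle', 'kranen-alle', 'spiegels-alle',
--           'tegels-alle']),
--     (40, ['douche', 'wastafels', 'kranen', 'toiletten', 'spiegels', 'tegels']),
-- ]
--
-- def map_category_from_filename(filename: str) -> tuple[str, int]:
--     """Map JSON filename to (category, priority)"""
--     f = filename.lower()
--     for priority, patterns in TIERS:
--         hit = next((p for p in patterns if p in f), None)
--         if hit is not None:
--             return (hit, priority)
--     return ('other', 0)
-- ===== Notes on version B (the rewrite author's own statement) =====
-- stated objective: alternative
-- what changed: B replaces A's track-the-maximum fold over a flat pattern->priority dict by an explicit list of descending priority tiers, each holding its patterns; it scans tiers top-down and returns the first matching pattern of the highest matching tier, with early exit.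
import Mathlib
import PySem

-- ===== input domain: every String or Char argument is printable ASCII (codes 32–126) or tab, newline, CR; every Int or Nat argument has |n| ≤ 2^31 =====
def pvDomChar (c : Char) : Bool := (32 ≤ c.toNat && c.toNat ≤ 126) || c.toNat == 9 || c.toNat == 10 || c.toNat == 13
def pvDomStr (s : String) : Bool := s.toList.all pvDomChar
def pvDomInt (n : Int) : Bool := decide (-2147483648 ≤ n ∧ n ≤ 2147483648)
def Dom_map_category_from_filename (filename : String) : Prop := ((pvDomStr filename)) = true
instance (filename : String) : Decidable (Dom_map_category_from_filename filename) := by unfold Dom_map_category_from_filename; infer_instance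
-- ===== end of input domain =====

-- B replaces A's track-the-maximum fold over a flat pattern dict by explicit
-- descending priority tiers scanned top-down with early exit (alternative decomposition).


-- ===== PORT A =====
-- module-level constant CATEGORY_PRIORITY (a dict literal; insertion order)
def CATEGORY_PRIORITY : List (String × Int) :=
  [("baden-inbouw", 100), ("bathtubs-inbouw", 100), ("baden-hoek", 100),
   ("bathtubs-hoek", 100), ("baden-vrijstaande", 100), ("bathtubs-vrijstaande", 100),
   ("bathtubs-half-vrijstaande", 95),
   ("baden-alle", 50), ("bathtubs-alle", 50), ("baden", 50), ("bathtubs", 50),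
   ("toiletten-alle", 50), ("douche-alle", 50), ("wastafels-alle", 50),
   ("kranen-alle", 50), ("spiegels-alle", 50), ("tegels-alle", 50),
   ("douche", 40), ("wastafels", 40), ("kranen", 40), ("toiletten", 40),
   ("spiegels", 40), ("tegels", 40)]

def map_category_from_filename (filename : String) : String × Int :=
  let filename_lower := PySem.Str.lower filename
  CATEGORY_PRIORITY.foldl
    (fun best pp =>
      if PySem.Str.isIn pp.1 filename_lower then
        if pp.2 > best.2 then (pp.1, pp.2) else best
      else best)
    ("other", 0)

-- ===== PORT B =====
-- TIERS: descending priorities, each with its patterns in dict insertion order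
def pvTiers : List (Int × List String) :=
  [(100, ["baden-inbouw", "bathtubs-inbouw", "baden-hoek", "bathtubs-hoek",
          "baden-vrijstaande", "bathtubs-vrijstaande"]),
   (95, ["bathtubs-half-vrijstaande"]),
   (50, ["baden-alle", "bathtubs-alle", "baden", "bathtubs", "toiletten-alle",
         "douche-alle", "wastafels-alle", "kranen-alle", "spiegels-alle",
         "tegels-alle"]),
   (40, ["douche", "wastafels", "kranen", "toiletten", "spiegels", "tegels"])]

-- next((p for p in patterns if p in f), None)
def pvFirstHit (f : String) : List String → Option String
  | [] => none
  | p :: rest => if PySem.Str.isIn p f then some p else pvFirstHit f rest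

-- the tier loop with early return
def pvScanTiers (f : String) : List (Int × List String) → String × Int
  | [] => ("other", 0)
  | (priority, patterns) :: rest =>
      match pvFirstHit f patterns with
      | some hit => (hit, priority)
      | none => pvScanTiers f rest

def map_category_from_filename_alt (filename : String) : String × Int :=
  pvScanTiers (PySem.Str.lower filename) pvTiers

-- ===== PRECONDITION & SPEC =====
def Spec_map_category_from_filename (filename : String) (out : String × Int) : Prop := out = map_category_from_filename_alt filename
instance (filename : String) (out : String × Int) : Decidable (Spec_map_category_from_filename filename out) := by unfold Spec_map_category_from_filename; infer_instance

-- ===== CLAIM (what is proved, stated in full; the proofs are below) =====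
def Claim_equal_map_category_from_filename : Prop := ∀ (filename : String), Dom_map_category_from_filename filename → Spec_map_category_from_filename filename (map_category_from_filename filename)

-- ===== LEMMAS AND PROOFS =====

-- flattening the tier table back to a flat (pattern, priority) list
def pvFlat (ts : List (Int × List String)) : List (String × Int) :=
  ts.flatMap (fun t => t.2.map (fun p => (p, t.1)))

-- first (pattern, priority) of a flat list whose pattern occurs in f
def pvFirstMatch (f : String) : List (String × Int) → String × Int
  | [] => ("other", 0)
  | (pattern, priority) :: rest =>
      if PySem.Str.isIn pattern f then (pattern, priority)
      else pvFirstMatch f rest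

-- scanning the tiers = first match of the flattened list
theorem pv_scan_eq_flat (f : String) (ts : List (Int × List String)) :
    pvScanTiers f ts = pvFirstMatch f (pvFlat ts) := by
  induction ts with
  | nil => rfl
  | cons t rest ih =>
    obtain ⟨prio, pats⟩ := t
    simp only [pvScanTiers, pvFlat, List.flatMap_cons]
    induction pats with
    | nil => simpa [pvFlat] using ih
    | cons p ps ihp =>
      simp only [pvFirstHit, List.map_cons, List.cons_append, pvFirstMatch]
      split_ifs with h
      · rfl
      · exact ihp

-- once the best match's priority dominates every remaining priority, A's fold is constant
theorem pv_foldl_const (fl : String) (b : String × Int) (l : List (String × Int))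
    (h : ∀ x ∈ l, x.2 ≤ b.2) :
    l.foldl (fun best pp =>
      if PySem.Str.isIn pp.1 fl then
        if pp.2 > best.2 then (pp.1, pp.2) else best
      else best) b = b := by
  induction l with
  | nil => rfl
  | cons p rest ih =>
    have hp : p.2 ≤ b.2 := h p (List.mem_cons_self ..)
    have hrest : ∀ x ∈ rest, x.2 ≤ b.2 := fun x hx => h x (List.mem_cons_of_mem _ hx)
    simp only [List.foldl_cons]
    have : (if PySem.Str.isIn p.1 fl then
        if p.2 > b.2 then (p.1, p.2) else b else b) = b := by
      split_ifs with h1 h2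
      · omega
      · rfl
      · rfl
    rw [this]; exact ih hrest

-- on a list sorted non-increasingly by priority with all priorities positive,
-- A's track-the-max fold equals the first-match scan
theorem pv_fold_eq_first (fl : String) (l : List (String × Int))
    (hsort : l.Pairwise (fun x y => y.2 ≤ x.2)) (hpos : ∀ x ∈ l, 0 < x.2) :
    l.foldl (fun best pp =>
      if PySem.Str.isIn pp.1 fl then
        if pp.2 > best.2 then (pp.1, pp.2) else best
      else best) ("other", (0 : Int)) = pvFirstMatch fl l := by
  induction l with
  | nil => rfl
  | cons p rest ih =>
    rcases List.pairwise_cons.mp hsort with ⟨hhead, hrest⟩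
    simp only [List.foldl_cons, pvFirstMatch]
    by_cases hin : PySem.Str.isIn p.1 fl
    · have hp : 0 < p.2 := hpos p (List.mem_cons_self ..)
      simp only [hin, show p.2 > (0 : Int) from hp, if_pos]
      exact pv_foldl_const fl (p.1, p.2) rest hhead
    · simp only [hin]
      exact ih hrest (fun x hx => hpos x (List.mem_cons_of_mem _ hx))

-- the tier table flattens back to the original dict
theorem pv_flat_tiers : pvFlat pvTiers = CATEGORY_PRIORITY := by decide

-- ===== VERDICT (by name: the statement is the Claim_ definition above) =====
theorem map_category_from_filename_spec : Claim_equal_map_category_from_filename := by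
  intro filename _
  unfold Spec_map_category_from_filename map_category_from_filename map_category_from_filename_alt
  rw [pv_scan_eq_flat, pv_flat_tiers]
  exact pv_fold_eq_first (PySem.Str.lower filename) CATEGORY_PRIORITY (by decide) (by decide)
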